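-- pv_equiv track=rewrite | github.com/Stratio/genai-agents | shared-skills/docx-reader/scripts/quick_extract.py | _strip_markdown_tables
-- ===== SOURCE A (Python) =====
-- def _strip_markdown_tables(md: str) -> str:
--     """Remove GFM table blocks from markdown output."""
--     lines = md.splitlines()
--     out = []
--     in_table = False
--     for line in lines:
--         stripped = line.strip()
--         if stripped.startswith("|") and stripped.endswith("|"):
--             in_table = True
--             continue
--         if in_table and not stripped:
--             in_table = False
--             out.append("")
--             continue
--         if in_table:
--             continue
--         out.append(line)
--     return "\n".join(out)
-- ===== SOURCE B (Python) =====
-- def _strip_markdown_tables(md: str) -> str: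
--     """Remove GFM table blocks from markdown output."""
--     lines = md.splitlines()
--     out = []
--     i, n = 0, len(lines)
--     while i < n:
--         s = lines[i].strip()
--         if s.startswith("|") and s.endswith("|"):
--             j = i + 1
--             while j < n and lines[j].strip():
--                 j += 1
--             if j < n:
--                 out.append("")
--             i = j + 1
--         else:
--             out.append(lines[i])
--             i += 1
--     return "\n".join(out)
-- ===== Notes on version B (the rewrite author's own statement) =====
-- stated objective: alternative
-- what changed: Replaces A's per-line state machine with an in_table boolean flag by a flag-free two-level scan: on meeting a table line it skips ahead to the next blank line (emitting a single '' if one exists) and resumes copying there.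
import Mathlib
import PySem

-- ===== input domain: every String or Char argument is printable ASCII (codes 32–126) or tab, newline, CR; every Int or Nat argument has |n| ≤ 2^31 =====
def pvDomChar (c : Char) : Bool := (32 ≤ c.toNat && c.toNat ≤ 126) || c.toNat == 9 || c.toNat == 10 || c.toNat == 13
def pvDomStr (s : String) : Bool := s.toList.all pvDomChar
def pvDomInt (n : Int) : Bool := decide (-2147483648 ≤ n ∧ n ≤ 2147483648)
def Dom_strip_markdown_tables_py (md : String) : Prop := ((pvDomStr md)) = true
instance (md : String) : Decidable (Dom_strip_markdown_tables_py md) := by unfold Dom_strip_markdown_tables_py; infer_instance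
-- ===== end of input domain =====

-- B replaces A's per-line boolean state machine by a skip-to-next-blank nested scan (objective: alternative decomposition, same cost).


-- ===== PORT A =====
-- A's loop body: state is (out, in_table)
def stripAStep (st : List String × Bool) (line : String) : List String × Bool :=
  let stripped := PySem.Str.strip line
  if PySem.Str.startswith stripped "|" && PySem.Str.endswith stripped "|" then
    (st.1, true)
  else if st.2 && stripped == "" then
    (st.1 ++ [""], false)
  else if st.2 then
    st
  else
    (st.1 ++ [line], st.2)

def strip_markdown_tables_py (md : String) : String :=
  let lines := PySem.Str.splitlines md
  let res := lines.foldl stripAStep ([], false)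
  PySem.Str.join "\n" res.1

-- ===== PORT B =====
-- B's table predicate
def altIsTable (line : String) : Bool :=
  let s := PySem.Str.strip line
  PySem.Str.startswith s "|" && PySem.Str.endswith s "|"

-- B's outer while loop (altGo) and inner skip-to-blank loop (altSkip), index loop ↔ list recursion
mutual
def altGo : List String → List String
  | [] => []
  | l :: rest =>
    if altIsTable l then altSkip rest
    else l :: altGo rest

def altSkip : List String → List String
  | [] => []
  | l :: rest =>
    if PySem.Str.strip l == "" then "" :: altGo rest
    else altSkip rest
end

def strip_markdown_tables_py_alt (md : String) : String :=
  PySem.Str.join "\n" (altGo (PySem.Str.splitlines md))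

-- ===== PRECONDITION & SPEC =====
def Spec_strip_markdown_tables_py (md : String) (out : String) : Prop := out = strip_markdown_tables_py_alt md
instance (md : String) (out : String) : Decidable (Spec_strip_markdown_tables_py md out) := by unfold Spec_strip_markdown_tables_py; infer_instance

-- ===== CLAIM (what is proved, stated in full; the proofs are below) =====
def Claim_equal_strip_markdown_tables_py : Prop := ∀ (md : String), Dom_strip_markdown_tables_py md → Spec_strip_markdown_tables_py md (strip_markdown_tables_py md)

-- ===== LEMMAS AND PROOFS =====
lemma startswith_empty_bar : PySem.Str.startswith "" "|" = false := by
  rw [PySem.Str.startswith_eq]; decide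

@[simp] lemma altGo_nil : altGo [] = [] := by rw [altGo]
@[simp] lemma altSkip_nil : altSkip [] = [] := by rw [altSkip]
@[simp] lemma altGo_cons (l : String) (rest : List String) :
    altGo (l :: rest) = if altIsTable l then altSkip rest else l :: altGo rest := by rw [altGo]
@[simp] lemma altSkip_cons (l : String) (rest : List String) :
    altSkip (l :: rest) = if PySem.Str.strip l == "" then "" :: altGo rest else altSkip rest := by
  rw [altSkip]

lemma stripA_loop (lines : List String) : ∀ (out : List String),
    (List.foldl stripAStep (out, false) lines).1 = out ++ altGo lines ∧
    (List.foldl stripAStep (out, true) lines).1 = out ++ altSkip lines := by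
  induction lines with
  | nil => intro out; simp
  | cons l rest ih =>
    intro out
    by_cases ht : (PySem.Str.startswith (PySem.Str.strip l) "|"
        && PySem.Str.endswith (PySem.Str.strip l) "|") = true
    · -- table line: both states go to in_table = true
      have hT : altIsTable l = true := ht
      have hbf : (PySem.Str.strip l == "") = false := by
        cases h : (PySem.Str.strip l == "") with
        | false => rfl
        | true =>
          have h0 : PySem.Str.strip l = "" := by simpa using h
          rw [h0, startswith_empty_bar] at ht
          simp at ht
      constructor
      · simp only [List.foldl_cons, stripAStep, ht, if_pos]
        simpa only [altGo_cons, hT, if_true] using (ih out).2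
      · simp only [List.foldl_cons, stripAStep, ht, if_pos]
        simpa only [altSkip_cons, hbf, Bool.false_eq_true, if_false] using (ih out).2
    · have hT : altIsTable l = false := by
        cases h : altIsTable l with
        | false => rfl
        | true => exact absurd h ht
      by_cases hb : (PySem.Str.strip l == "") = true
      · -- blank line
        constructor
        · simp only [List.foldl_cons, stripAStep, ht, hb]
          simpa only [altGo_cons, hT, Bool.false_eq_true, Bool.false_and, Bool.true_and, if_false,
            if_true, List.append_assoc, List.singleton_append] using (ih (out ++ [l])).1
        · simp only [List.foldl_cons, stripAStep, ht, hb, Bool.true_and, if_true]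
          simpa only [altSkip_cons, hb, if_true, Bool.false_eq_true, if_false,
            List.append_assoc, List.singleton_append] using (ih (out ++ [""])).1
      · -- ordinary non-blank non-table line
        have hbf : (PySem.Str.strip l == "") = false := by
          cases h : (PySem.Str.strip l == "") with
          | false => rfl
          | true => exact absurd h hb
        constructor
        · simp only [List.foldl_cons, stripAStep, ht, hb]
          simpa only [altGo_cons, hT, Bool.false_eq_true, Bool.false_and, Bool.and_false, if_false,
            List.append_assoc, List.singleton_append] using (ih (out ++ [l])).1
        · simp only [List.foldl_cons, stripAStep, ht, hb]
          simpa only [altSkip_cons, hbf, Bool.false_eq_true, Bool.false_and, Bool.and_false,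
            if_false] using (ih out).2

-- ===== VERDICT (by name: the statement is the Claim_ definition above) =====
theorem strip_markdown_tables_py_spec : Claim_equal_strip_markdown_tables_py := by
  intro md _
  unfold Spec_strip_markdown_tables_py strip_markdown_tables_py strip_markdown_tables_py_alt
  have h := (stripA_loop (PySem.Str.splitlines md) []).1
  simp only [List.nil_append] at h
  simp [h]
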